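-- pv_equiv track=rewrite | github.com/JiteshNayak2004/capstone | parallel_programming/shared_mem_modelling/ArithmeticIntensity/parallel_ai.py | num_elements
-- ===== SOURCE A (Python) =====
-- def num_elements(seq1_len, seq2_len):
--     min_dim = min(seq1_len, seq2_len)
--     max_dim = max(seq1_len, seq2_len)
--     num_diagonal_elements = 0  # Initialize the variable
--
--     for i in range(seq1_len + seq2_len-1):
--         if i < min_dim:
--             num_diagonal_elements += 1
--         elif i < max_dim:
--             continue  # No action, continue to next iteration
--         else:
--             num_diagonal_elements += 3
--
--     return num_diagonal_elements
-- ===== SOURCE B (Python) =====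
-- def num_elements(seq1_len, seq2_len):
--     # Closed form: count the range elements in each band instead of looping.
--     n = seq1_len + seq2_len - 1
--     if n <= 0:
--         return 0
--     ones = min(max(min(seq1_len, seq2_len), 0), n)
--     hi = min(max(max(seq1_len, seq2_len), 0), n)
--     return ones + 3 * (n - hi)
-- ===== Notes on version B (the rewrite author's own statement) =====
-- stated objective: faster
-- what changed: Replaced the O(seq1_len+seq2_len) per-index loop with an O(1) closed form counting the size of each band (i<min, min<=i<max, i>=max) of the range directly.
import Mathlib
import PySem

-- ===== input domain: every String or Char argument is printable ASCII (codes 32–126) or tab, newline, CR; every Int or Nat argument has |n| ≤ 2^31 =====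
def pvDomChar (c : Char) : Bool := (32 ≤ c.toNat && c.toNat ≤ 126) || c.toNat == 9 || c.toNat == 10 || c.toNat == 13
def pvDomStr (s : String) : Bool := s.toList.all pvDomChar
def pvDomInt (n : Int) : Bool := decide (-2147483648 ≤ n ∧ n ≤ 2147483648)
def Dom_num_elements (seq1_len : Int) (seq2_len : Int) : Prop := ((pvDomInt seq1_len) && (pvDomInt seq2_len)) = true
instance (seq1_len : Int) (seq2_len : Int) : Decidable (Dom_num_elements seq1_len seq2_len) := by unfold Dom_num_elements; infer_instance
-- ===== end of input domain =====

-- B replaces A's per-index loop by an O(1) closed form counting each band of the range.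

-- ===== PORT A =====
def num_elements (seq1_len : Int) (seq2_len : Int) : Int :=
  let min_dim := min seq1_len seq2_len
  let max_dim := max seq1_len seq2_len
  (PySem.List.pyRange 0 (seq1_len + seq2_len - 1) 1).foldl
    (fun acc i => if i < min_dim then acc + 1 else if i < max_dim then acc else acc + 3) 0

-- ===== PORT B =====
def num_elements_alt (seq1_len : Int) (seq2_len : Int) : Int :=
  let n := seq1_len + seq2_len - 1
  if n ≤ 0 then 0
  else
    let ones := min (max (min seq1_len seq2_len) 0) n
    let hi := min (max (max seq1_len seq2_len) 0) n
    ones + 3 * (n - hi)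

-- ===== PRECONDITION & SPEC =====
def Spec_num_elements (seq1_len : Int) (seq2_len : Int) (out : Int) : Prop := out = num_elements_alt seq1_len seq2_len
instance (seq1_len : Int) (seq2_len : Int) (out : Int) : Decidable (Spec_num_elements seq1_len seq2_len out) := by unfold Spec_num_elements; infer_instance

-- ===== CLAIM (what is proved, stated in full; the proofs are below) =====
def Claim_equal_num_elements : Prop := ∀ (seq1_len : Int) (seq2_len : Int), Dom_num_elements seq1_len seq2_len → Spec_num_elements seq1_len seq2_len (num_elements seq1_len seq2_len)

-- ===== LEMMAS AND PROOFS =====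

theorem pv_fold_closed (lo hi : Int) (h : lo ≤ hi) : ∀ (N : ℕ),
    (PySem.List.pyRange 0 (N : Int) 1).foldl
      (fun acc i => if i < lo then acc + 1 else if i < hi then acc else acc + 3) 0
    = min (max lo 0) (N : Int) + 3 * ((N : Int) - min (max hi 0) (N : Int)) := by
  intro N
  induction N with
  | zero =>
      simp only [Nat.cast_zero]
      rw [PySem.List.pyRange_one_eq_nil (le_refl (0:Int))]
      simp only [List.foldl]
      omega
  | succ N ih =>
      have h0 : (0 : Int) ≤ (N : Int) := by positivity
      have hcast : ((N + 1 : ℕ) : Int) = (N : Int) + 1 := by push_cast; ring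
      rw [hcast, PySem.List.pyRange_one_succ_right h0, List.foldl_append, ih]
      simp only [List.foldl]
      split_ifs <;> omega

theorem num_elements_spec' (s1 s2 : Int) : num_elements s1 s2 = num_elements_alt s1 s2 := by
  unfold num_elements num_elements_alt
  by_cases hn : s1 + s2 - 1 ≤ 0
  · rw [PySem.List.pyRange_one_eq_nil hn]
    simp [hn]
  · have hpos : 0 < s1 + s2 - 1 := by omega
    have hcast : ((s1 + s2 - 1).toNat : Int) = s1 + s2 - 1 := by omega
    have := pv_fold_closed (min s1 s2) (max s1 s2) (min_le_max) (s1 + s2 - 1).toNat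
    rw [hcast] at this
    simp only [this, hn, if_false]

-- ===== VERDICT (by name: the statement is the Claim_ definition above) =====
theorem num_elements_spec : Claim_equal_num_elements := by
  intro s1 s2 _
  exact num_elements_spec' s1 s2
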